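-- pv_equiv track=rewrite | github.com/zhipeng-cai/FastLog | src/get_multiple_statement.py | post_process_punctuation
-- ===== SOURCE A (Python) =====
-- def post_process_punctuation(logsta):
--     if logsta == None:
--         return ""
--     text_len = len(logsta)
--     insert_space_idxs = []
--     is_inside_quotes = False
--     for i in range(text_len):
--         if logsta[i] == '"':
--             is_inside_quotes = not is_inside_quotes
--         if is_inside_quotes:
--             continue
--         if logsta[i] == '.' or logsta[i] == ',':
--             insert_space_idxs.append(i)
--     for i in reversed(insert_space_idxs):
--         logsta = logsta[:i] + " " + logsta[i:]
--
--     return logsta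
-- ===== SOURCE B (Python) =====
-- def post_process_punctuation(logsta):
--     if logsta is None:
--         return ""
--
--     def pad(seg):
--         return ''.join(' ' + c if c in '.,' else c for c in seg)
--
--     parts = logsta.split('"')
--     # even-indexed parts lie outside quotes, odd-indexed parts inside
--     return '"'.join(pad(seg) if i % 2 == 0 else seg
--                     for i, seg in enumerate(parts))
-- ===== Notes on version B (the rewrite author's own statement) =====
-- stated objective: idiomatic
-- what changed: Instead of a per-character quote-flag scan that collects indices and then repeatedly re-slices the string to insert spaces, B splits the string at quote characters, pads periods and commas with a leading space only in the even-indexed (outside-quotes) segments, and rejoins the segments.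
import Mathlib
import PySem

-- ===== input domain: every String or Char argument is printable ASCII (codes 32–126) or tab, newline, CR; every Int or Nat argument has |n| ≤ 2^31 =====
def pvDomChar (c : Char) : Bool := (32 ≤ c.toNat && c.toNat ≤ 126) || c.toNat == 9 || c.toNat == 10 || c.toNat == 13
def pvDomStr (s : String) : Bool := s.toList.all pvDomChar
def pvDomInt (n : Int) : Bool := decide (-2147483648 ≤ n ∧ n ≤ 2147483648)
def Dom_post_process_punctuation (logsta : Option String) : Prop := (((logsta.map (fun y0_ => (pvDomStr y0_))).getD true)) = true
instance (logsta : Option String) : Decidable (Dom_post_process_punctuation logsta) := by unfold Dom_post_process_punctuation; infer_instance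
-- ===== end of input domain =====

-- B splits the string at quote characters and pads punctuation only in the even-indexed
-- (outside-quotes) segments; A tracks a per-character quote flag, collects indices, and
-- re-slices the string for each insertion.

-- ===== PORT A =====
def post_process_punctuation (logsta : Option String) : String :=
  match logsta with
  | none => ""
  | some s =>
    let cs := s.toList
    -- for i in range(text_len): toggle flag on '"', collect indices of unquoted '.'/',':
    let st := (PySem.List.pyRange 0 (cs.length : Int) 1).foldl
      (fun (st : List Int × Bool) i =>
        let inside := if PySem.List.pyGetD cs i ' ' = '"' then !st.2 else st.2
        if inside then (st.1, inside)
        else if PySem.List.pyGetD cs i ' ' = '.' ∨ PySem.List.pyGetD cs i ' ' = ',' then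
          (st.1 ++ [i], inside)
        else (st.1, inside))
      ([], false)
    -- for i in reversed(insert_space_idxs): logsta = logsta[:i] + " " + logsta[i:]
    String.mk (st.1.reverse.foldl
      (fun t i => PySem.List.slice t none (some i) ++ [' '] ++ PySem.List.slice t (some i) none)
      cs)

-- ===== PORT B =====
-- ''.join(' ' + c if c in '.,' else c for c in seg)
def pvPad (seg : List Char) : List Char :=
  (seg.map (fun c => if c = '.' ∨ c = ',' then [' ', c] else [c])).flatten

def post_process_punctuation_alt (logsta : Option String) : String :=
  match logsta with
  | none => ""
  | some s =>
    let parts := PySem.Chars.splitOn s.toList ['"']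
    String.mk (PySem.Chars.join ['"']
      ((PySem.List.enumerate parts).map
        (fun p => if PySem.Int.mod p.1 2 = 0 then pvPad p.2 else p.2)))

-- ===== PRECONDITION & SPEC =====
def Spec_post_process_punctuation (logsta : Option String) (out : String) : Prop := out = post_process_punctuation_alt logsta
instance (logsta : Option String) (out : String) : Decidable (Spec_post_process_punctuation logsta out) := by unfold Spec_post_process_punctuation; infer_instance

-- ===== CLAIM (what is proved, stated in full; the proofs are below) =====
def Claim_equal_post_process_punctuation : Prop := ∀ (logsta : Option String), Dom_post_process_punctuation logsta → Spec_post_process_punctuation logsta (post_process_punctuation logsta)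

-- ===== LEMMAS AND PROOFS =====

-- canonical one-pass form both programs are reduced to
def pvTog (q : Bool) (c : Char) : Bool := if c = '"' then !q else q

def pvCanon : Bool → List Char → List Char
  | _, [] => []
  | q, c :: cs =>
    (if pvTog q c = false ∧ (c = '.' ∨ c = ',') then [' ', c] else [c]) ++ pvCanon (pvTog q c) cs

-- ---- A side ----
def pvIdxs : Bool → Nat → List Char → List Nat
  | _, _, [] => []
  | q, k, c :: cs =>
    (if pvTog q c = false ∧ (c = '.' ∨ c = ',') then [k] else []) ++ pvIdxs (pvTog q c) (k+1) cs

def pvPar : Bool → List Char → Bool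
  | q, [] => q
  | q, c :: cs => pvPar (pvTog q c) cs

def pvMark : List Char → List Nat → Nat → List Char
  | [], _, _ => []
  | c :: cs, idxs, p => (if p ∈ idxs then [' ', c] else [c]) ++ pvMark cs idxs (p+1)

theorem pvIdxs_bounds (cs : List Char) : ∀ (q : Bool) (k j : Nat),
    j ∈ pvIdxs q k cs → k ≤ j ∧ j < k + cs.length := by
  induction cs with
  | nil => intro q k j h; simp [pvIdxs] at h
  | cons c cs ih =>
    intro q k j h
    simp only [pvIdxs, List.mem_append] at h
    rcases h with h | h
    · split at h <;> simp_all
    · have := ih (pvTog q c) (k+1) j h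
      constructor
      · omega
      · simp only [List.length_cons]; omega

theorem pvIdxs_pairwise (cs : List Char) : ∀ (q : Bool) (k : Nat),
    (pvIdxs q k cs).Pairwise (· < ·) := by
  induction cs with
  | nil => intro q k; simp [pvIdxs]
  | cons c cs ih =>
    intro q k
    simp only [pvIdxs]
    rw [List.pairwise_append]
    refine ⟨by split <;> simp, ih _ _, ?_⟩
    intro a ha b hb
    have hb' := pvIdxs_bounds cs (pvTog q c) (k+1) b hb
    split at ha <;> simp_all

theorem pvScan (cs : List Char) : ∀ (suf : List Char) (k : Nat) (acc : List Int) (q : Bool),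
    cs.drop k = suf →
    (PySem.List.pyRange (k : Int) (cs.length : Int) 1).foldl
      (fun (st : List Int × Bool) i =>
        let inside := if PySem.List.pyGetD cs i ' ' = '"' then !st.2 else st.2
        if inside then (st.1, inside)
        else if PySem.List.pyGetD cs i ' ' = '.' ∨ PySem.List.pyGetD cs i ' ' = ',' then
          (st.1 ++ [i], inside)
        else (st.1, inside))
      (acc, q)
    = (acc ++ (pvIdxs q k suf).map (fun (n : Nat) => (n : Int)), pvPar q suf) := by
  intro suf
  induction suf with
  | nil =>
    intro k acc q hdrop
    have hk : cs.length ≤ k := by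
      by_contra h
      have := List.drop_eq_nil_iff.mp hdrop
      omega
    have hr : PySem.List.pyRange (k : Int) (cs.length : Int) 1 = [] := by
      simp [PySem.List.pyRange]; omega
    simp [hr, pvIdxs, pvPar]
  | cons c rest ih =>
    intro k acc q hdrop
    have hk : k < cs.length := by
      by_contra h
      rw [List.drop_eq_nil_iff.mpr (by omega)] at hdrop
      simp at hdrop
    have hget : cs[k] = c := by
      have h0 : (cs.drop k)[0]'(by rw [hdrop]; simp) = c := by
        simp only [hdrop]; rfl
      rw [List.getElem_drop] at h0
      simpa using h0
    have hdrop' : cs.drop (k+1) = rest := by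
      have h1 : cs.drop (k+1) = (cs.drop k).drop 1 := by rw [List.drop_drop]
      rw [h1, hdrop]; rfl
    have hcast : ((k : Int) + 1) = ((k+1 : Nat) : Int) := by push_cast; ring
    rw [PySem.List.pyRange_one_cons (by exact_mod_cast hk)]
    simp only [List.foldl_cons]
    have hgetD : PySem.List.pyGetD cs (k : Int) ' ' = c := by
      rw [PySem.List.pyGetD_natCast]
      simp [List.getD, hget, List.getElem?_eq_getElem hk]
    simp only [hgetD, hcast]
    rw [ih (k+1) _ _ hdrop']
    simp only [pvIdxs, pvPar, pvTog]
    by_cases hq : (if c = '"' then !q else q) = true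
    · simp [hq]
    · simp only [Bool.not_eq_true] at hq
      by_cases hp : c = '.' ∨ c = ','
      · simp [hq, hp]
      · simp [hq, hp]

theorem pvMark_nil_idxs (cs : List Char) : ∀ p, pvMark cs [] p = cs := by
  induction cs with
  | nil => intro p; rfl
  | cons c cs ih => intro p; simp [pvMark, ih]

theorem pvMark_drop_lt (cs : List Char) : ∀ (j p : Nat) (idxs : List Nat), j < p →
    pvMark cs (j :: idxs) p = pvMark cs idxs p := by
  induction cs with
  | nil => intros; rfl
  | cons c cs ih =>
    intro j p idxs hj
    simp only [pvMark, List.mem_cons]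
    rw [ih j (p+1) idxs (by omega)]
    have h : ¬ (p = j) := by omega
    simp [h]

theorem pvMark_insert (cs : List Char) : ∀ (i p : Nat) (idxs : List Nat),
    i < cs.length → (∀ j ∈ idxs, p + i < j) →
    (pvMark cs idxs p).take i ++ ' ' :: (pvMark cs idxs p).drop i = pvMark cs ((p+i) :: idxs) p := by
  induction cs with
  | nil => intro i p idxs h; simp at h
  | cons c cs ih =>
    intro i p idxs hi hj
    have hp : p ∉ idxs := fun h => by have := hj p h; omega
    match i with
    | 0 =>
      simp only [Nat.add_zero, pvMark, List.take_zero, List.drop_zero, List.nil_append]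
      rw [pvMark_drop_lt cs p (p+1) idxs (by omega)]
      simp [hp]
    | i'+1 =>
      have hM : pvMark (c :: cs) idxs p = c :: pvMark cs idxs (p+1) := by
        simp [pvMark, hp]
      have hcond : ¬ (p = p + (i'+1) ∨ p ∈ idxs) := by
        rintro (h | h)
        · omega
        · exact hp h
      have hR : pvMark (c :: cs) ((p + (i'+1)) :: idxs) p
          = c :: pvMark cs ((p + (i'+1)) :: idxs) (p+1) := by
        simp only [pvMark, List.mem_cons]
        rw [if_neg hcond]
        rfl
      rw [hM, hR, List.take_succ_cons, List.drop_succ_cons]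
      simp only [List.cons_append]
      have hrec := ih i' (p+1) idxs (by simpa using hi) (fun j h => by have := hj j h; omega)
      have harr : p + 1 + i' = p + (i'+1) := by omega
      rw [harr] at hrec
      rw [hrec]

theorem pvMark_idxs (cs : List Char) : ∀ (q : Bool) (k : Nat),
    pvMark cs (pvIdxs q k cs) k = pvCanon q cs := by
  induction cs with
  | nil => intro q k; rfl
  | cons c cs ih =>
    intro q k
    have hnot : k ∉ pvIdxs (pvTog q c) (k+1) cs := by
      intro h
      have := pvIdxs_bounds cs (pvTog q c) (k+1) k h
      omega
    simp only [pvIdxs, pvMark, pvCanon]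
    by_cases hc : pvTog q c = false ∧ (c = '.' ∨ c = ',')
    · simp only [if_pos hc, List.singleton_append]
      rw [pvMark_drop_lt cs k (k+1) _ (by omega), ih]
      simp
    · simp only [if_neg hc, List.nil_append]
      rw [ih]
      simp [hnot]

theorem pvInsAllInt (idxs : List Nat) (cs : List Char)
    (hp : idxs.Pairwise (· < ·)) (hb : ∀ i ∈ idxs, i < cs.length) :
    (idxs.map (fun (n : Nat) => (n : Int))).reverse.foldl
      (fun t i => PySem.List.slice t none (some i) ++ [' '] ++ PySem.List.slice t (some i) none)
      cs = pvMark cs idxs 0 := by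
  induction idxs with
  | nil => simp [pvMark_nil_idxs]
  | cons i rest ih =>
    simp only [List.map_cons, List.reverse_cons, List.foldl_append, List.foldl_cons,
      List.foldl_nil]
    rw [ih (List.Pairwise.of_cons hp) (fun j h => hb j (List.mem_cons_of_mem _ h))]
    rw [PySem.List.slice_to _ (by positivity), PySem.List.slice_from _ (by positivity)]
    simp only [Int.toNat_natCast]
    have hlt : ∀ j ∈ rest, 0 + i < j := by
      intro j h
      have := (List.pairwise_cons.mp hp).1 j h
      omega
    have h := pvMark_insert cs i 0 rest (hb i (by simp)) hlt
    simpa using h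

theorem pvA_canon (s : String) :
    post_process_punctuation (some s) = String.mk (pvCanon false s.toList) := by
  show String.mk
      ((((PySem.List.pyRange ((0 : Nat) : Int) (s.toList.length : Int) 1).foldl
        (fun (st : List Int × Bool) i =>
          let inside := if PySem.List.pyGetD s.toList i ' ' = '"' then !st.2 else st.2
          if inside then (st.1, inside)
          else if PySem.List.pyGetD s.toList i ' ' = '.' ∨ PySem.List.pyGetD s.toList i ' ' = ',' then
            (st.1 ++ [i], inside)
          else (st.1, inside))
        ([], false)).1).reverse.foldl
        (fun t i => PySem.List.slice t none (some i) ++ [' '] ++ PySem.List.slice t (some i) none)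
        s.toList)
    = String.mk (pvCanon false s.toList)
  rw [pvScan s.toList s.toList 0 [] false (by simp)]
  simp only [List.nil_append]
  rw [pvInsAllInt (pvIdxs false 0 s.toList) s.toList (pvIdxs_pairwise _ _ _) (fun i h => by
    have := pvIdxs_bounds s.toList false 0 i h
    omega)]
  rw [pvMark_idxs]

-- ---- B side ----
def pvSp : List Char → List Char × List (List Char)
  | [] => ([], [])
  | c :: cs =>
    if c = '"' then ([], (pvSp cs).1 :: (pvSp cs).2) else (c :: (pvSp cs).1, (pvSp cs).2)

theorem pvGo_spec : ∀ (fuel : Nat) (l cur : List Char) (acc : List (List Char)),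
    l.length < fuel →
    PySem.Chars.splitOn.go ['"'] fuel l cur acc
    = acc.reverse ++ (cur.reverse ++ (pvSp l).1) :: (pvSp l).2 := by
  intro fuel
  induction fuel with
  | zero => intro l cur acc h; omega
  | succ fuel ih =>
    intro l cur acc h
    match l with
    | [] =>
      rw [PySem.Chars.splitOn.go.eq_def]
      simp [pvSp]
    | c :: rest =>
      by_cases hc : c = '"'
      · subst hc
        have hpre : List.isPrefixOf ['"'] ('"' :: rest) = true := by
          simp [List.isPrefixOf]
        simp only [PySem.Chars.splitOn.go, hpre, if_true, List.length_cons, List.length_nil,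
          List.drop_succ_cons, List.drop_zero]
        rw [ih rest [] (cur.reverse :: acc) (by simp at h ⊢; omega)]
        simp [pvSp]
      · have hpre : List.isPrefixOf ['"'] (c :: rest) = false := by
          simp only [List.isPrefixOf, Bool.and_true, beq_eq_false_iff_ne]
          exact fun h => hc h.symm
        simp only [PySem.Chars.splitOn.go, hpre, Bool.false_eq_true, if_false]
        rw [ih rest (c :: cur) acc (by simp at h ⊢; omega)]
        simp [pvSp, hc]

theorem pvSplitOn_eq (cs : List Char) :
    PySem.Chars.splitOn cs ['"'] = (pvSp cs).1 :: (pvSp cs).2 := by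
  show PySem.Chars.splitOn.go ['"'] (cs.length + 1) cs [] [] = (pvSp cs).1 :: (pvSp cs).2
  rw [pvGo_spec (cs.length + 1) cs [] [] (by omega)]
  simp

def pvProcess : Bool → List (List Char) → List (List Char)
  | _, [] => []
  | b, p :: ps => (if b then pvPad p else p) :: pvProcess (!b) ps

theorem pvEnum_map (parts : List (List Char)) : ∀ (k : Nat),
    (PySem.List.enumerate parts (k : Int)).map
      (fun p => if PySem.Int.mod p.1 2 = 0 then pvPad p.2 else p.2)
    = pvProcess (k % 2 = 0) parts := by
  induction parts with
  | nil => intro k; simp [PySem.List.enumerate, pvProcess]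
  | cons p ps ih =>
    intro k
    rw [PySem.List.enumerate_cons]
    simp only [List.map_cons]
    have hc : ((k : Int) + 1) = ((k+1 : Nat) : Int) := by push_cast; ring
    rw [hc, ih (k+1)]
    have hiff : (PySem.Int.mod (k : Int) 2 = 0) ↔ (k % 2 = 0) := by
      rw [show ((2 : Int)) = ((2 : Nat) : Int) from rfl, PySem.Int.mod_natCast]
      exact_mod_cast Nat.cast_eq_zero
    by_cases hk : k % 2 = 0
    · have h1 : ¬ ((k+1) % 2 = 0) := by omega
      rw [if_pos (hiff.mpr hk)]
      simp [pvProcess, hk, h1]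
    · have h1 : (k+1) % 2 = 0 := by omega
      rw [if_neg (fun h => hk (hiff.mp h))]
      simp [pvProcess, hk, h1]

theorem pvJoin_cons_append (sep y x : List Char) (rest : List (List Char)) :
    PySem.Chars.join sep ((y ++ x) :: rest) = y ++ PySem.Chars.join sep (x :: rest) := by
  match rest with
  | [] => rw [PySem.Chars.join_singleton, PySem.Chars.join_singleton]
  | r :: rs =>
    rw [PySem.Chars.join_cons_cons, PySem.Chars.join_cons_cons]
    simp [List.append_assoc]

theorem pvCanon_join (cs : List Char) : ∀ (q : Bool),
    pvCanon q cs = PySem.Chars.join ['"'] (pvProcess (!q) ((pvSp cs).1 :: (pvSp cs).2)) := by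
  induction cs with
  | nil =>
    intro q
    have hpadnil : (if (!q) = true then pvPad [] else []) = [] := by
      by_cases hq : q <;> simp [hq, pvPad]
    simp only [pvCanon, pvSp, pvProcess, hpadnil, PySem.Chars.join_singleton]
  | cons c cs ih =>
    intro q
    by_cases hc : c = '"'
    · subst hc
      have htog : pvTog q '"' = !q := by simp [pvTog]
      have hcond : ¬ ((!q) = false ∧ (('"' : Char) = '.' ∨ ('"' : Char) = ',')) := by
        rintro ⟨-, h2 | h2⟩ <;> exact absurd h2 (by decide)
      have hsp1 : (pvSp ('"' :: cs)).1 = [] := by simp [pvSp]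
      have hsp2 : (pvSp ('"' :: cs)).2 = (pvSp cs).1 :: (pvSp cs).2 := by simp [pvSp]
      have hpadnil : (if (!q) = true then pvPad [] else []) = [] := by
        by_cases hq : q <;> simp [hq, pvPad]
      simp only [pvCanon, htog, hsp1, hsp2]
      rw [if_neg hcond]
      simp only [pvProcess, hpadnil, Bool.not_not]
      rw [PySem.Chars.join_cons_cons]
      rw [ih (!q), Bool.not_not]
      simp [pvProcess]
    · have htog : pvTog q c = q := by simp [pvTog, hc]
      have hsp1 : (pvSp (c :: cs)).1 = c :: (pvSp cs).1 := by simp [pvSp, hc]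
      have hsp2 : (pvSp (c :: cs)).2 = (pvSp cs).2 := by simp [pvSp, hc]
      simp only [pvCanon, htog, hsp1, hsp2, pvProcess]
      have hsplit : (if (!q) = true then pvPad (c :: (pvSp cs).1) else c :: (pvSp cs).1)
          = (if q = false ∧ (c = '.' ∨ c = ',') then [' ', c] else [c])
            ++ (if (!q) = true then pvPad (pvSp cs).1 else (pvSp cs).1) := by
        by_cases hq : q
        · simp [hq]
        · simp only [eq_false_of_ne_true hq, Bool.not_false, if_true, true_and]
          simp [pvPad]
      rw [hsplit, pvJoin_cons_append]
      rw [ih q]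
      simp [pvProcess]

theorem pvB_canon (s : String) :
    post_process_punctuation_alt (some s) = String.mk (pvCanon false s.toList) := by
  show String.mk (PySem.Chars.join ['"']
      ((PySem.List.enumerate (PySem.Chars.splitOn s.toList ['"']) ((0 : Nat) : Int)).map
        (fun p => if PySem.Int.mod p.1 2 = 0 then pvPad p.2 else p.2)))
    = String.mk (pvCanon false s.toList)
  rw [pvSplitOn_eq, pvEnum_map]
  rw [pvCanon_join s.toList false]
  norm_num

-- ===== VERDICT (by name: the statement is the Claim_ definition above) =====
theorem post_process_punctuation_spec : Claim_equal_post_process_punctuation := by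
  intro logsta _
  unfold Spec_post_process_punctuation
  match logsta with
  | none => rfl
  | some s => rw [pvA_canon, pvB_canon]
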